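-- pv_equiv track=rewrite | github.com/seon54/algorithms | fastcampus/type/search/1668.py | ascending
-- ===== SOURCE A (Python) =====
-- def ascending(array):
--     now = array[0]
--     result = 1
--     for i in range(1, len(array)):
--         if now < array[i]:
--             result += 1
--             now = array[i]
--     return result
-- ===== SOURCE B (Python) =====
-- def ascending(array):
--     # Build the prefix-maximum table, then count its distinct values.
--     pm = []
--     m = None
--     for x in array:
--         m = x if m is None else max(m, x)
--         pm.append(m)
--     return len(set(pm))
-- ===== Notes on version B (the rewrite author's own statement) =====
-- stated objective: alternative
-- what changed: Replaces the single greedy scalar pass (running max + counter) with a table-build-then-count decomposition: first compute the prefix-maximum sequence, then return the number of distinct values in it.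
-- crash fix: On the empty list A raises IndexError (array[0]); B returns 0, the natural count of greedily increasing elements of an empty array. — e.g. on ascending([]): A raises IndexError, B returns 0
import Mathlib
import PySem

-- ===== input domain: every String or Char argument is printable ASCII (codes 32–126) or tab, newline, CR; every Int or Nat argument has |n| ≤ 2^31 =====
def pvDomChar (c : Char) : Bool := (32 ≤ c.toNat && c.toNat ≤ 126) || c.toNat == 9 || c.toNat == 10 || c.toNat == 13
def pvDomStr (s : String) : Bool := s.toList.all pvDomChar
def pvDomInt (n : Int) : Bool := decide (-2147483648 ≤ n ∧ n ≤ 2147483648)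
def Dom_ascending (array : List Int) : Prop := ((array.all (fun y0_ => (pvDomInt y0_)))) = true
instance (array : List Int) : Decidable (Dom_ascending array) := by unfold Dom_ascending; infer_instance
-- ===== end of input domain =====

-- B replaces A's single greedy scalar pass with a prefix-maximum table followed by a distinct count
-- (objective: alternative decomposition, same cost); on [] A raises IndexError, B returns 0 (outside Pre_).

-- ===== PORT A =====
def ascending (array : List Int) : Int :=
  match PySem.List.pyGet? array 0 with
  | none => 0  -- array[0] raises IndexError here: excluded by Pre_ascending
  | some now0 =>
    let st := (PySem.List.pyRange 1 (array.length : Int) 1).foldl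
      (fun (s : Int × Int) i =>
        if s.1 < PySem.List.pyGetD array i 0 then (PySem.List.pyGetD array i 0, s.2 + 1) else s)
      (now0, 1)
    st.2

-- ===== PORT B =====
def ascending_alt (array : List Int) : Int :=
  let st := array.foldl
    (fun (s : List Int × Option Int) x =>
      let m : Int := match s.2 with | none => x | some m0 => max m0 x
      (s.1 ++ [m], some m)) ([], none)
  ((PySem.Set.ofList st.1).length : Int)

-- ===== PRECONDITION & SPEC =====
-- Pre_ excludes exactly the empty list, on which A's 'array[0]' raises IndexError.
def Pre_ascending (array : List Int) : Prop := array ≠ []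
instance (array : List Int) : Decidable (Pre_ascending array) := by unfold Pre_ascending; infer_instance
def pvWitness_ascending : List Int := [3, 1, 4, 4, 6]

-- On the empty list A raises IndexError (array[0]); B returns 0, the natural count for an empty array.
def Raises_ascending (array : List Int) : Prop := array = []
instance (array : List Int) : Decidable (Raises_ascending array) := by unfold Raises_ascending; infer_instance
def pvRaiseWitness_ascending : List Int := []
def pvRaiseWitnessOut_ascending : Int := 0

def Spec_ascending (array : List Int) (out : Int) : Prop := out = ascending_alt array
instance (array : List Int) (out : Int) : Decidable (Spec_ascending array out) := by unfold Spec_ascending; infer_instance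

-- ===== CLAIM (what is proved, stated in full; the proofs are below) =====
def Claim_equal_ascending : Prop := ∀ (array : List Int), Dom_ascending array → Pre_ascending array → Spec_ascending array (ascending array)
def Claim_raises_ascending : Prop := (∀ (array : List Int), Dom_ascending array → Raises_ascending array → ¬ Pre_ascending array) ∧ (Dom_ascending (pvRaiseWitness_ascending) ∧ Raises_ascending (pvRaiseWitness_ascending) ∧ ascending_alt (pvRaiseWitness_ascending) = pvRaiseWitnessOut_ascending)

-- ===== LEMMAS AND PROOFS =====

-- the two fold bodies, named for the proofs
def stepA (s : Int × Int) (x : Int) : Int × Int :=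
  if s.1 < x then (x, s.2 + 1) else s

def stepB (s : List Int × Option Int) (x : Int) : List Int × Option Int :=
  let m : Int := match s.2 with | none => x | some m0 => max m0 x
  (s.1 ++ [m], some m)

lemma ofList_append_single (pm : List Int) (y : Int) :
    PySem.Set.ofList (pm ++ [y]) = PySem.Set.add (PySem.Set.ofList pm) y := by
  rw [PySem.Set.ofList_eq_foldl, List.foldl_append, ← PySem.Set.ofList_eq_foldl]
  rfl

lemma key (rest : List Int) : ∀ (now r : Int) (pm : List Int),
    now ∈ pm → (∀ y ∈ pm, y ≤ now) →
    ((PySem.Set.ofList ((rest.foldl stepB (pm, some now)).1)).length : Int)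
      = (rest.foldl stepA (now, r)).2 + ((PySem.Set.ofList pm).length : Int) - r := by
  induction rest with
  | nil => intro now r pm _ _; simp
  | cons x rest ih =>
    intro now r pm hmem hub
    by_cases hlt : now < x
    · have hmax : max now x = x := max_eq_right hlt.le
      have hx : x ∉ PySem.Set.ofList pm := by
        rw [PySem.Set.mem_ofList pm x]
        intro hx
        exact absurd (hub x hx) (not_le.mpr hlt)
      have hadd : PySem.Set.add (PySem.Set.ofList pm) x = PySem.Set.ofList pm ++ [x] := by
        simp [PySem.Set.add, hx]
      have := ih x (r + 1) (pm ++ [x]) (by simp) (by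
        intro y hy
        rcases List.mem_append.mp hy with h | h
        · exact (hub y h).trans hlt.le
        · simp at h; omega)
      simp only [List.foldl_cons, stepA, stepB, hmax, if_pos hlt]
      rw [this, ofList_append_single, hadd]
      simp; omega
    · have hmax : max now x = now := max_eq_left (not_lt.mp hlt)
      have hn : now ∈ PySem.Set.ofList pm := (PySem.Set.mem_ofList pm now).mpr hmem
      have hadd : PySem.Set.add (PySem.Set.ofList pm) now = PySem.Set.ofList pm := by
        simp [PySem.Set.add, hn]
      have := ih now r (pm ++ [now]) (by simp) (by
        intro y hy
        rcases List.mem_append.mp hy with h | h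
        · exact hub y h
        · simp at h; omega)
      simp only [List.foldl_cons, stepA, stepB, hmax, if_neg hlt]
      rw [this, ofList_append_single, hadd]

-- ===== VERDICT (by name: the statement is the Claim_ definition above) =====
theorem ascending_spec : Claim_equal_ascending := by
  intro array _ hpre
  unfold Spec_ascending
  obtain ⟨a, t, rfl⟩ := List.exists_cons_of_ne_nil hpre
  unfold ascending ascending_alt
  have h0 : PySem.List.pyGet? (a :: t) 0 = some a := by
    simp [PySem.List.pyGet?, PySem.List.pyIdx?]
  rw [h0]
  have hr : (PySem.List.pyRange 1 ((a :: t).length : Int) 1).foldl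
      (fun (s : Int × Int) i =>
        if s.1 < PySem.List.pyGetD (a :: t) i 0 then (PySem.List.pyGetD (a :: t) i 0, s.2 + 1) else s)
      (a, 1) = ((a :: t).drop 1).foldl stepA (a, 1) := by
    exact PySem.List.foldl_pyRange_pyGetD' (a :: t) 0 stepA (a, 1) (by norm_num)
  simp only [hr]
  have hb : (a :: t).foldl
      (fun (s : List Int × Option Int) x =>
        let m : Int := match s.2 with | none => x | some m0 => max m0 x
        (s.1 ++ [m], some m)) ([], none) = t.foldl stepB ([a], some a) := by
    have hfun : (fun (s : List Int × Option Int) x =>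
        let m : Int := match s.2 with | none => x | some m0 => max m0 x
        (s.1 ++ [m], some m)) = stepB := by
      funext s x; rcases s with ⟨pm, m⟩; cases m <;> rfl
    rw [hfun]
    rfl
  simp only [hb, List.drop_succ_cons, List.drop_zero]
  have := key t a 1 [a] (by simp) (by simp)
  rw [this]
  simp [PySem.Set.ofList]

@[simp] theorem ascending_raises : Claim_raises_ascending := by
  unfold Claim_raises_ascending
  exact ⟨fun array _ h => by simp [Raises_ascending, Pre_ascending] at *; exact h, by decide⟩
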